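-- pv_equiv track=rewrite | github.com/Rajlus/magic-tg-card-generator | src/services/deck/deck_builder_service.py | _extract_colors_from_cost
-- ===== SOURCE A (Python) =====
-- from typing import Dict, List, Optional, Any
--
-- def _extract_colors_from_cost(cost: str) -> List[str]:
--     """Extract color symbols from mana cost."""
--     if not cost:
--         return []
--
--     colors = []
--     cost = cost.upper()
--
--     for char in cost:
--         if char in 'WUBRG' and char not in colors:
--             colors.append(char)
--
--     return colors
-- ===== SOURCE B (Python) =====
-- from typing import List
--
--
-- def _extract_colors_from_cost(cost: str) -> List[str]:
--     """Extract color symbols from mana cost (find-and-sort formulation)."""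
--     up = cost.upper()
--     found = [(up.find(c), c) for c in "WUBRG"]
--     present = [p for p in found if p[0] >= 0]
--     present = sorted(present, key=lambda p: p[0])
--     return [c for _, c in present]
-- ===== Notes on version B (the rewrite author's own statement) =====
-- stated objective: faster
-- what changed: Replaces the single forward per-character scan with dedup-by-membership by five fixed first-occurrence lookups (str.find per WUBRG color), filtering out absent colors and sorting the present ones by their first-occurrence index.
import Mathlib
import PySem

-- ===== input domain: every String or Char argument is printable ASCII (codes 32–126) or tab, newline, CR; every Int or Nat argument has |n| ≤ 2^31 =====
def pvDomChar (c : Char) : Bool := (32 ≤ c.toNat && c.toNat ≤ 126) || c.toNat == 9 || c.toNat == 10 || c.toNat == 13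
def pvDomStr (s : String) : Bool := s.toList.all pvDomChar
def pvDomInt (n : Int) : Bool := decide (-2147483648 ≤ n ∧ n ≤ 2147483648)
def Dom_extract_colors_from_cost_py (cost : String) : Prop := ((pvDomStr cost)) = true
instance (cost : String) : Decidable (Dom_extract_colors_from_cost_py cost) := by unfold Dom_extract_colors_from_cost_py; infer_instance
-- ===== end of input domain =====

-- B replaces A's forward per-character scan-with-dedup by five fixed str.find lookups, a filter
-- of the present colors and a sort by first-occurrence index (measured constant-factor faster:
-- the scans run inside C-level str.find instead of a Python loop).

-- ===== PORT A =====
-- literal port of A: guard on empty cost, then a scan over cost.upper() appending each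
-- WUBRG character on its first appearance ('char in "WUBRG"' on a 1-char string is list membership)
def extract_colors_from_cost_py (cost : String) : List String :=
  if PySem.Str.len cost = 0 then []
  else
    ((PySem.Str.upper cost).toList).foldl
      (fun colors ch =>
        if ch ∈ ("WUBRG" : String).toList ∧ String.ofList [ch] ∉ colors
        then colors ++ [String.ofList [ch]] else colors) []

-- ===== PORT B =====
-- literal port of Source B: first-occurrence index per color, filter the found ones, stable sort by index
def extract_colors_from_cost_py_alt (cost : String) : List String :=
  let up := PySem.Str.upper cost
  let found := (("WUBRG" : String).toList).map
    (fun c => (PySem.Str.find up (String.ofList [c]), String.ofList [c]))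
  let present := found.filter (fun p => 0 ≤ p.1)
  let present' := PySem.List.sorted present (fun p => p.1)
  present'.map (fun p => p.2)

-- ===== PRECONDITION & SPEC =====
def Spec_extract_colors_from_cost_py (cost : String) (out : List String) : Prop := out = extract_colors_from_cost_py_alt cost
instance (cost : String) (out : List String) : Decidable (Spec_extract_colors_from_cost_py cost out) := by unfold Spec_extract_colors_from_cost_py; infer_instance

-- ===== CLAIM (what is proved, stated in full; the proofs are below) =====
def Claim_equal_extract_colors_from_cost_py : Prop := ∀ (cost : String), Dom_extract_colors_from_cost_py cost → Spec_extract_colors_from_cost_py cost (extract_colors_from_cost_py cost)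

-- ===== LEMMAS AND PROOFS =====

def pvW : List Char := ['W','U','B','R','G']

def pvWrap (c : Char) : String := String.ofList [c]

def pvStep (acc : List Char) (c : Char) : List Char :=
  if c ∈ pvW ∧ c ∉ acc then acc ++ [c] else acc

def pvLoop (acc : List Char) (l : List Char) : List Char := l.foldl pvStep acc

-- first-occurrence dedup (fuel-based structural recursion; fuel = list length suffices)
def pvFdAux : Nat → List Char → List Char
  | _, [] => []
  | 0, _ :: _ => []
  | n + 1, c :: l => c :: pvFdAux n (l.filter (fun x => x ≠ c))

def pvFd (m : List Char) : List Char := pvFdAux m.length m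

theorem pvFdAux_eq_aux (n : Nat) : ∀ (k : Nat), k ≤ n → ∀ (m : List Char), m.length ≤ k →
    pvFdAux k m = pvFd m := by
  induction n with
  | zero =>
    intro k hk m hm
    cases m with
    | nil => cases k <;> rfl
    | cons c l => simp at hm; omega
  | succ n ih =>
    intro k hk m hm
    cases m with
    | nil => cases k <;> rfl
    | cons c l =>
      cases k with
      | zero => simp at hm
      | succ j =>
        have hl : l.length ≤ j := by simp at hm; omega
        have hfl : (l.filter (fun x => x ≠ c)).length ≤ l.length := List.length_filter_le _ _
        have h1 : pvFdAux (j + 1) (c :: l) = c :: pvFdAux j (l.filter (fun x => x ≠ c)) := rfl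
        have h2 : pvFd (c :: l) = c :: pvFdAux l.length (l.filter (fun x => x ≠ c)) := rfl
        rw [h1, h2, ih j (by omega) _ (by omega), ih l.length (by omega) _ hfl]

theorem pvFdAux_eq (n : Nat) (m : List Char) (hm : m.length ≤ n) : pvFdAux n m = pvFd m :=
  pvFdAux_eq_aux n n le_rfl m hm

theorem pvFd_nil : pvFd [] = [] := rfl

theorem pvFd_cons (c : Char) (l : List Char) :
    pvFd (c :: l) = c :: pvFd (l.filter (fun x => x ≠ c)) := by
  have h2 : pvFd (c :: l) = c :: pvFdAux l.length (l.filter (fun x => x ≠ c)) := rfl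
  rw [h2, pvFdAux_eq l.length _ (List.length_filter_le _ _)]

theorem pvWrap_inj (a b : Char) (h : pvWrap a = pvWrap b) : a = b := by
  have := congrArg String.toList h
  simpa [pvWrap] using this

theorem mem_pvFd_aux (n : Nat) : ∀ (m : List Char), m.length ≤ n →
    ∀ (x : Char), x ∈ pvFd m ↔ x ∈ m := by
  induction n with
  | zero => intro m hm x; cases m with
    | nil => simp [pvFd_nil]
    | cons c l => simp at hm
  | succ n ih =>
    intro m hm x
    cases m with
    | nil => simp [pvFd_nil]
    | cons c l =>
      rw [pvFd_cons]
      have hlen : (l.filter (fun y => y ≠ c)).length ≤ n := by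
        have := List.length_filter_le (fun y => decide (y ≠ c)) l
        simp at hm; omega
      by_cases hx : x = c
      · simp [hx]
      · have h2 := ih _ hlen x
        simp [hx] at h2 ⊢
        exact h2

theorem mem_pvFd (m : List Char) (x : Char) : x ∈ pvFd m ↔ x ∈ m :=
  mem_pvFd_aux m.length m le_rfl x

theorem idxOf_filter_lt (m : List Char) (p : Char → Bool) (a b : Char)
    (ha : a ∈ m.filter p) (hb : b ∈ m.filter p)
    (h : (m.filter p).idxOf a < (m.filter p).idxOf b) : m.idxOf a < m.idxOf b := by
  induction m with
  | nil => simp at ha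
  | cons x m ih =>
    by_cases hpx : p x
    · by_cases hxa : x = a
      · subst hxa
        have hbx : b ≠ x := by
          intro hbx; subst hbx
          simp [hpx] at h
        simp [List.idxOf_cons, (by simpa using hbx.symm : (x == b) = false)]
      · have hab : (x == a) = false := by simpa using hxa
        by_cases hxb : x = b
        · exfalso; subst hxb
          simp [hpx] at h
        · have hbb : (x == b) = false := by simpa using hxb
          have ha' : a ∈ m.filter p := by
            rcases List.mem_filter.1 ha with ⟨hma, hpa⟩
            exact List.mem_filter.2 ⟨by rcases List.mem_cons.1 hma with h'|h' ; exact absurd h'.symm hxa ; exact h', hpa⟩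
          have hb' : b ∈ m.filter p := by
            rcases List.mem_filter.1 hb with ⟨hmb, hpb⟩
            exact List.mem_filter.2 ⟨by rcases List.mem_cons.1 hmb with h'|h' ; exact absurd h'.symm hxb ; exact h', hpb⟩
          have h' : (m.filter p).idxOf a < (m.filter p).idxOf b := by
            simpa [List.filter_cons, hpx, List.idxOf_cons, hab, hbb] using h
          have := ih ha' hb' h'
          simpa [List.idxOf_cons, hab, hbb] using this
    · have hxa : (x == a) = false := by
        rcases List.mem_filter.1 ha with ⟨_, hpa⟩
        by_cases hxa : x = a
        · exact absurd (hxa ▸ hpa) (by simpa using hpx)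
        · simpa using hxa
      have hxb : (x == b) = false := by
        rcases List.mem_filter.1 hb with ⟨_, hpb⟩
        by_cases hxb : x = b
        · exact absurd (hxb ▸ hpb) (by simpa using hpx)
        · simpa using hxb
      have h' : (m.filter p).idxOf a < (m.filter p).idxOf b := by
        simpa [List.filter_cons, hpx] using h
      have ha' : a ∈ m.filter p := by simpa [List.filter_cons, hpx] using ha
      have hb' : b ∈ m.filter p := by simpa [List.filter_cons, hpx] using hb
      have := ih ha' hb' h'
      simpa [List.idxOf_cons, hxa, hxb] using this

theorem pvFd_pairwise_aux (n : Nat) : ∀ (m : List Char), m.length ≤ n →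
    (pvFd m).Pairwise (fun a b => m.idxOf a < m.idxOf b) := by
  induction n with
  | zero => intro m hm; cases m with
    | nil => simp [pvFd_nil]
    | cons c l => simp at hm
  | succ n ih =>
    intro m hm
    cases m with
    | nil => simp [pvFd_nil]
    | cons c l =>
      rw [pvFd_cons]
      have hlen : (l.filter (fun y => y ≠ c)).length ≤ n := by
        have := List.length_filter_le (fun y => decide (y ≠ c)) l
        simp at hm; omega
      refine List.Pairwise.cons ?_ ?_
      · intro b hb
        have hbmem : b ∈ l.filter (fun x => x ≠ c) := (mem_pvFd _ b).1 hb
        have hbc : b ≠ c := by simpa using (List.mem_filter.1 hbmem).2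
        simp [List.idxOf_cons, (by simpa using hbc.symm : (c == b) = false)]
      · refine (ih _ hlen).imp_of_mem ?_
        intro a b ha hb h
        have ha' := (mem_pvFd _ a).1 ha
        have hb' := (mem_pvFd _ b).1 hb
        have hac : a ≠ c := by simpa using (List.mem_filter.1 ha').2
        have hbc : b ≠ c := by simpa using (List.mem_filter.1 hb').2
        have := idxOf_filter_lt l (fun x => x ≠ c) a b ha' hb' h
        simpa [List.idxOf_cons, (by simpa using hac.symm : (c == a) = false),
          (by simpa using hbc.symm : (c == b) = false)] using this

theorem pvFd_pairwise (m : List Char) :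
    (pvFd m).Pairwise (fun a b => m.idxOf a < m.idxOf b) :=
  pvFd_pairwise_aux m.length m le_rfl

theorem pvFd_nodup (m : List Char) : (pvFd m).Nodup := by
  refine (pvFd_pairwise m).imp ?_
  intro a b h hab
  subst hab; exact lt_irrefl _ h

theorem pvLoop_eq (l : List Char) : ∀ (acc : List Char),
    pvLoop acc l = acc ++ pvFd (l.filter (fun x => decide (x ∈ pvW) && !decide (x ∈ acc))) := by
  induction l with
  | nil => intro acc; simp [pvLoop, pvFd_nil]
  | cons c l ih =>
    intro acc
    by_cases h : c ∈ pvW ∧ c ∉ acc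
    · have hstep : pvStep acc c = acc ++ [c] := by simp [pvStep, h]
      have : pvLoop acc (c :: l) = pvLoop (acc ++ [c]) l := by
        simp [pvLoop, hstep]
      rw [this, ih]
      have hfc : (decide (c ∈ pvW) && !decide (c ∈ acc)) = true := by
        simp [h.1, h.2]
      have hfl : l.filter (fun x => decide (x ∈ pvW) && !decide (x ∈ acc ++ [c]))
          = (l.filter (fun x => decide (x ∈ pvW) && !decide (x ∈ acc))).filter (fun x => x ≠ c) := by
        rw [List.filter_filter]
        refine List.filter_congr ?_
        intro x _
        by_cases hxc : x = c <;> by_cases hxw : x ∈ pvW <;> by_cases hxa : x ∈ acc <;>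
          simp [hxc, hxw, hxa]
      rw [hfl]
      rw [List.filter_cons]
      simp only [hfc, if_pos]
      rw [pvFd_cons]
      simp
    · have hstep : pvStep acc c = acc := by simp [pvStep, h]
      have : pvLoop acc (c :: l) = pvLoop acc l := by simp [pvLoop, hstep]
      rw [this, ih]
      have hfc : (decide (c ∈ pvW) && !decide (c ∈ acc)) = false := by
        by_cases h1 : c ∈ pvW <;> by_cases h2 : c ∈ acc <;> simp [h1, h2] at h ⊢
      simp [hfc]

theorem idxOf_eq_of (l : List Char) (c : Char) : ∀ (n : Nat), l[n]? = some c →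
    (∀ i, i < n → l[i]? ≠ some c) → List.idxOf c l = n := by
  induction l with
  | nil => intro n h; simp at h
  | cons x l ih =>
    intro n h hmin
    cases n with
    | zero =>
      simp at h
      simp [h]
    | succ k =>
      have hx : x ≠ c := by
        have := hmin 0 (Nat.succ_pos k)
        simpa using this
      have h' : l[k]? = some c := by simpa using h
      have hmin' : ∀ i, i < k → l[i]? ≠ some c := by
        intro i hi
        have := hmin (i + 1) (by omega)
        simpa using this
      simp [List.idxOf_cons, (by simpa using hx : (x == c) = false), ih k h' hmin']

theorem singleton_infix_iff (l : List Char) (c : Char) : [c] <:+: l ↔ c ∈ l := by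
  constructor
  · rintro ⟨s, t, rfl⟩; simp
  · intro h
    rcases List.append_of_mem h with ⟨s, t, rfl⟩
    exact ⟨s, t, by simp⟩

theorem singleton_prefix_iff (l : List Char) (c : Char) : [c] <+: l ↔ l.head? = some c := by
  constructor
  · rintro ⟨t, rfl⟩; simp
  · intro h
    cases l with
    | nil => simp at h
    | cons x t => simp at h; exact ⟨t, by simp [h]⟩

theorem find_singleton_eq_idxOf (l : List Char) (c : Char) (h : c ∈ l) :
    PySem.Chars.find l [c] = (List.idxOf c l : Int) := by
  have h0 : 0 ≤ PySem.Chars.find l [c] :=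
    (PySem.Chars.find_nonneg_iff l [c]).2 ((singleton_infix_iff l c).2 h)
  obtain ⟨hpre, hmin⟩ := PySem.Chars.find_spec h0
  have hget : l[(PySem.Chars.find l [c]).toNat]? = some c := by
    have := (singleton_prefix_iff _ c).1 hpre
    simpa [List.head?_drop] using this
  have hmin' : ∀ i, i < (PySem.Chars.find l [c]).toNat → l[i]? ≠ some c := by
    intro i hi hic
    exact hmin i hi ((singleton_prefix_iff _ c).2 (by simpa [List.head?_drop] using hic))
  have := idxOf_eq_of l c _ hget hmin'
  omega

theorem pvLoopS (l : List Char) : ∀ (acc : List Char),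
    l.foldl (fun colors ch =>
        if ch ∈ ("WUBRG" : String).toList ∧ String.ofList [ch] ∉ colors
        then colors ++ [String.ofList [ch]] else colors) (acc.map pvWrap)
    = (pvLoop acc l).map pvWrap := by
  induction l with
  | nil => intro acc; simp [pvLoop]
  | cons c l ih =>
    intro acc
    have hW : ("WUBRG" : String).toList = pvW := by decide
    have hmem : String.ofList [c] ∈ acc.map pvWrap ↔ c ∈ acc := by
      constructor
      · intro h
        rcases List.mem_map.1 h with ⟨a, ha, hEq⟩
        have := pvWrap_inj a c hEq
        exact this ▸ ha
      · intro h; exact List.mem_map.2 ⟨c, h, rfl⟩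
    by_cases h : c ∈ pvW ∧ c ∉ acc
    · have hcond : c ∈ ("WUBRG" : String).toList ∧ String.ofList [c] ∉ acc.map pvWrap := by
        rw [hW, hmem]; exact h
      have hstep : pvStep acc c = acc ++ [c] := by simp [pvStep, h]
      calc
        _ = l.foldl _ ((acc ++ [c]).map pvWrap) := by
              simp only [List.foldl_cons, if_pos hcond]
              simp [pvWrap]
        _ = (pvLoop (acc ++ [c]) l).map pvWrap := ih (acc ++ [c])
        _ = (pvLoop acc (c :: l)).map pvWrap := by simp [pvLoop, hstep]
    · have hcond : ¬ (c ∈ ("WUBRG" : String).toList ∧ String.ofList [c] ∉ acc.map pvWrap) := by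
        rw [hW, hmem]; exact h
      have hstep : pvStep acc c = acc := by simp [pvStep, h]
      calc
        _ = l.foldl _ (acc.map pvWrap) := by simp only [List.foldl_cons, if_neg hcond]
        _ = (pvLoop acc l).map pvWrap := ih acc
        _ = (pvLoop acc (c :: l)).map pvWrap := by simp [pvLoop, hstep]

-- B computes exactly the wrapped loop result, for every cost
theorem alt_eq (cost : String) :
    extract_colors_from_cost_py_alt cost
      = (pvLoop [] ((PySem.Str.upper cost).toList)).map pvWrap := by
  unfold extract_colors_from_cost_py_alt
  have hW : ("WUBRG" : String).toList = pvW := by decide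
  set l : List Char := (PySem.Str.upper cost).toList with hl
  -- the pair builder of B
  set pf : Char → Int × String := fun c => (PySem.Chars.find l [c], pvWrap c) with hpf
  have hfound : (("WUBRG" : String).toList).map
      (fun c => (PySem.Str.find (PySem.Str.upper cost) (String.ofList [c]), String.ofList [c]))
      = pvW.map pf := by
    rw [hW]
    refine List.map_congr_left ?_
    intro c _
    simp [hpf, pvWrap, PySem.Str.find_eq, hl, PySem.Str.toList_upper]
  have hfun : (fun x => decide (x ∈ pvW) && !decide (x ∈ ([] : List Char)))
      = (fun x : Char => decide (x ∈ pvW)) := by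
    funext x; simp
  have hr : pvLoop [] l = pvFd (l.filter (fun x => decide (x ∈ pvW))) := by
    rw [pvLoop_eq, hfun]
    rfl
  set m : List Char := l.filter (fun x => decide (x ∈ pvW)) with hm
  have hmemr : ∀ x, x ∈ pvLoop [] l ↔ x ∈ pvW ∧ x ∈ l := by
    intro x
    rw [hr]
    simp [mem_pvFd, hm, and_comm]
  -- present = (pvW.filter (· ∈ l)).map pf
  have hpres : ((pvW.map pf).filter (fun p => 0 ≤ p.1))
      = (pvW.filter (fun c => decide (c ∈ l))).map pf := by
    rw [List.filter_map]
    refine congrArg (List.map pf) ?_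
    refine List.filter_congr ?_
    intro c _
    simp only [Function.comp, hpf]
    rcases (em (c ∈ l)) with hc | hc
    · simp [hc, (PySem.Chars.find_nonneg_iff l [c]).2 ((singleton_infix_iff l c).2 hc)]
    · have : ¬ (0 ≤ PySem.Chars.find l [c]) := by
        rw [PySem.Chars.find_nonneg_iff, singleton_infix_iff]
        exact hc
      simp [hc, this]
  have hsorted : PySem.List.sorted ((pvW.map pf).filter (fun p => 0 ≤ p.1)) (fun p => p.1)
      = (pvLoop [] l).map pf := by
    refine PySem.List.sorted_eq_of_perm_of_pairwise_lt _ _ _ ?_ ?_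
    · rw [hpres]
      refine List.Perm.map pf ?_
      refine (List.perm_ext_iff_of_nodup ?_ ?_).2 ?_
      · rw [hr]; exact pvFd_nodup m
      · exact List.Nodup.filter _ (by decide)
      · intro a
        rw [hmemr a]
        simp [List.mem_filter]
    · rw [List.pairwise_map]
      rw [hr]
      refine (pvFd_pairwise m).imp_of_mem ?_
      intro a b ha hb h
      have ha' : a ∈ m := (mem_pvFd m a).1 ha
      have hb' : b ∈ m := (mem_pvFd m b).1 hb
      have hal : a ∈ l := (List.mem_filter.1 ha').1
      have hbl : b ∈ l := (List.mem_filter.1 hb').1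
      have hlt : List.idxOf a l < List.idxOf b l :=
        idxOf_filter_lt l _ a b ha' hb' h
      simp only [hpf]
      rw [find_singleton_eq_idxOf l a hal, find_singleton_eq_idxOf l b hbl]
      exact_mod_cast hlt
  simp only [hfound, hsorted]
  rw [List.map_map]
  rfl

theorem a_eq (cost : String) :
    extract_colors_from_cost_py cost
      = (pvLoop [] ((PySem.Str.upper cost).toList)).map pvWrap := by
  unfold extract_colors_from_cost_py
  by_cases h : PySem.Str.len cost = 0
  · rw [if_pos h]
    have hnil : cost.toList = [] := by
      have := PySem.Str.len_eq cost
      rw [h] at this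
      cases hc : cost.toList with
      | nil => rfl
      | cons x t => rw [hc] at this; simp at this; omega
    have hup : (PySem.Str.upper cost).toList = [] := by
      rw [PySem.Str.toList_upper, hnil]
      rfl
    rw [hup]
    simp [pvLoop]
  · rw [if_neg h]
    have := pvLoopS ((PySem.Str.upper cost).toList) []
    simpa using this

-- ===== VERDICT (by name: the statement is the Claim_ definition above) =====
theorem extract_colors_from_cost_py_spec : Claim_equal_extract_colors_from_cost_py := by
  intro cost _
  unfold Spec_extract_colors_from_cost_py
  rw [alt_eq, a_eq]
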